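-- pv_equiv track=rewrite | github.com/Chrisaor/StudyPython | GeeksforGeeks/Practice/2. Basic/36.MinimizeStringValue.py | minimize_string
-- ===== SOURCE A (Python) =====
-- import string
--
-- def minimize_string(str1, k):
--     str_list = [i for i in str1]
--     cnt_list = list()
--     ascii_str = [i for i in string.ascii_lowercase]
--     for i in ascii_str:
--         if i in str1:
--             cnt_list.append(str1.count(i))
--     for i in range(k):
--         if max(cnt_list) == 0:
--             return 0
--         else:
--             cnt_list[cnt_list.index(max(cnt_list))] -= 1
--     return sum([i**2 for i in cnt_list])
-- ===== SOURCE B (Python) =====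
-- import string
--
-- def minimize_string(str1, k):
--     cs = [str1.count(ch) for ch in string.ascii_lowercase if ch in str1]
--     total = sum(cs)
--     if k >= total:
--         return 0
--     if k <= 0:
--         return sum(c * c for c in cs)
--     # smallest level L >= 0 with excess(L) <= k, found by binary search
--     def excess(L):
--         return sum(c - L for c in cs if c > L)
--     lo, hi = 0, max(cs)
--     while lo < hi:
--         mid = (lo + hi) // 2
--         if excess(mid) <= k:
--             hi = mid
--         else:
--             lo = mid + 1
--     L = lo
--     rem = k - excess(L)
--     m = sum(1 for c in cs if c >= L)
--     return (sum(c * c for c in cs if c < L)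
--             + (m - rem) * L * L + rem * (L - 1) * (L - 1))
-- ===== Notes on version B (the rewrite author's own statement) =====
-- stated objective: faster
-- what changed: Instead of simulating k single decrements of the running maximum (each iteration rescanning the count list with max() and .index()), B binary-searches the water-filling level L at which the k decrements level off the counts and evaluates the final sum of squares in closed form from that level.
import Mathlib
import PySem

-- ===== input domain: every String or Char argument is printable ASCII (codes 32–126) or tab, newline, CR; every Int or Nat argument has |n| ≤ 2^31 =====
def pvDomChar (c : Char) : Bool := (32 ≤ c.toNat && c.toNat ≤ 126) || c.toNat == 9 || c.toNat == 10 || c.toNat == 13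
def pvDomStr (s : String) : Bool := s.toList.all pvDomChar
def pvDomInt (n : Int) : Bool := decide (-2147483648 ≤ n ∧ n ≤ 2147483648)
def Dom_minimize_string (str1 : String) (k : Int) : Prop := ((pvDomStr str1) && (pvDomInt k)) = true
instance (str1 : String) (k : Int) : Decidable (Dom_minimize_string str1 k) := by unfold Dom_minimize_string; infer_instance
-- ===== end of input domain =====

-- B replaces A's k single decrements of the running maximum by a water-filling level found
-- with binary search; equality is about the return value (A mutates only locals).

-- ===== PORT A =====
-- the 'for i in range(k)' loop of A; none = the ValueError of max([]) on an empty count list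
def pvALoop : List Int → Nat → Option Int
  | cnt, 0 => some ((cnt.map (fun i => i ^ 2)).sum)
  | cnt, n+1 =>
    match PySem.List.max? cnt (fun x => x) with
    | none => none
    | some m =>
      if m = 0 then some 0
      else
        match PySem.List.index? cnt m with
        | none => none
        | some idx =>
            pvALoop (PySem.List.pySetD cnt (idx : Int)
                      (PySem.List.pyGetD cnt (idx : Int) 0 - 1)) n

def minimize_string (str1 : String) (k : Int) : Int :=
  let _str_list := str1.toList
  let ascii_str := "abcdefghijklmnopqrstuvwxyz".toList
  let cnt_list : List Int := ascii_str.foldl (fun acc i =>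
      if PySem.Str.isIn (String.singleton i) str1 then
        acc ++ [(PySem.Str.count str1 (String.singleton i) : Int)]
      else acc) []
  (pvALoop cnt_list k.toNat).getD 0

-- ===== PORT B =====
-- sum over [c - L for c in cs if c > L]
def pvExcess (cs : List Int) (L : Int) : Int :=
  ((cs.filter (fun c => decide (L < c))).map (fun c => c - L)).sum

-- the 'while lo < hi' binary search of Source B
def pvBisect (cs : List Int) (k : Int) (lo hi : Int) : Int :=
  if h : lo < hi then
    if pvExcess cs (PySem.Int.floordiv (lo + hi) 2) ≤ k then
      pvBisect cs k lo (PySem.Int.floordiv (lo + hi) 2)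
    else
      pvBisect cs k (PySem.Int.floordiv (lo + hi) 2 + 1) hi
  else lo
termination_by (hi - lo).toNat
decreasing_by
  · have hlt : PySem.Int.floordiv (lo + hi) 2 < hi :=
      (PySem.Int.floordiv_lt_iff_lt_mul (by norm_num)).2 (by omega)
    omega
  · have hb := PySem.Int.floordiv_two_mid_bounds (le_of_lt h)
    omega

def minimize_string_alt (str1 : String) (k : Int) : Int :=
  let cs : List Int := ("abcdefghijklmnopqrstuvwxyz".toList).foldl (fun acc i =>
      if PySem.Str.isIn (String.singleton i) str1 then
        acc ++ [(PySem.Str.count str1 (String.singleton i) : Int)]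
      else acc) []
  let total := cs.sum
  if total ≤ k then 0
  else if k ≤ 0 then (cs.map (fun c => c * c)).sum
  else
    let L := pvBisect cs k 0 ((PySem.List.max? cs (fun x => x)).getD 0)
    let rem := k - pvExcess cs L
    let m : Int := ((cs.filter (fun c => decide (L ≤ c))).length : Int)
    ((cs.filter (fun c => decide (c < L))).map (fun c => c * c)).sum
      + (m - rem) * L * L + rem * (L - 1) * (L - 1)

-- ===== PRECONDITION & SPEC =====
-- Pre_ excludes exactly the inputs where Python A raises: k ≥ 1 with no lowercase letter
-- in str1 (max() of an empty count list is a ValueError).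
def Pre_minimize_string (str1 : String) (k : Int) : Prop :=
  1 ≤ k → (str1.toList.any (fun c => 97 ≤ c.toNat && c.toNat ≤ 122)) = true
instance (str1 : String) (k : Int) : Decidable (Pre_minimize_string str1 k) := by
  unfold Pre_minimize_string; infer_instance
def pvWitness_minimize_string : String × Int := ("abca", 2)

def Spec_minimize_string (str1 : String) (k : Int) (out : Int) : Prop := out = minimize_string_alt str1 k
instance (str1 : String) (k : Int) (out : Int) : Decidable (Spec_minimize_string str1 k out) := by unfold Spec_minimize_string; infer_instance

-- ===== CLAIM (what is proved, stated in full; the proofs are below) =====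
def Claim_equal_minimize_string : Prop := ∀ (str1 : String) (k : Int), Dom_minimize_string str1 k → Pre_minimize_string str1 k → Spec_minimize_string str1 k (minimize_string str1 k)

-- ===== LEMMAS AND PROOFS =====

-- #{c in cs : L ≤ c}
def pvCountGe (cs : List Int) (L : Int) : Nat := (cs.filter (fun c => decide (L ≤ c))).length

-- the count list after j = pvExcess cs L + rem decrements of the maximum:
-- entries below L keep their value, the rest sit at level L except rem of them at L-1
def pvCanon (cs : List Int) (L : Int) (rem : Nat) : List Int :=
  cs.filter (fun c => decide (c < L)) ++ List.replicate (pvCountGe cs L - rem) L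
    ++ List.replicate rem (L - 1)

lemma pvExcess_cons (c : Int) (cs : List Int) (L : Int) :
    pvExcess (c :: cs) L = (if L < c then c - L else 0) + pvExcess cs L := by
  simp only [pvExcess, List.filter_cons]
  split_ifs with h <;> simp_all

lemma pvCountGe_cons (c : Int) (cs : List Int) (L : Int) :
    pvCountGe (c :: cs) L = (if L ≤ c then 1 else 0) + pvCountGe cs L := by
  simp only [pvCountGe, List.filter_cons]
  split_ifs with h <;> simp_all [Nat.add_comm]

lemma pvExcess_anti (cs : List Int) {L L' : Int} (h : L ≤ L') :
    pvExcess cs L' ≤ pvExcess cs L := by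
  induction cs with
  | nil => simp [pvExcess]
  | cons c cs ih => rw [pvExcess_cons, pvExcess_cons]; split_ifs <;> omega

lemma pvExcess_zero_of (cs : List Int) (h : ∀ c ∈ cs, 0 ≤ c) : pvExcess cs 0 = cs.sum := by
  induction cs with
  | nil => simp [pvExcess]
  | cons c cs ih =>
    have hc := h c (List.mem_cons_self ..)
    rw [pvExcess_cons, List.sum_cons, ih (fun x hx => h x (List.mem_cons_of_mem _ hx))]
    split_ifs <;> omega

lemma pvExcess_eq_zero_of_le (cs : List Int) (L : Int) (h : ∀ c ∈ cs, c ≤ L) :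
    pvExcess cs L = 0 := by
  induction cs with
  | nil => simp [pvExcess]
  | cons c cs ih =>
    have hc := h c (List.mem_cons_self ..)
    rw [pvExcess_cons, ih (fun x hx => h x (List.mem_cons_of_mem _ hx))]
    split_ifs <;> omega

lemma pvExcess_sub_one (cs : List Int) (L : Int) :
    pvExcess cs (L - 1) = pvExcess cs L + (pvCountGe cs L : Int) := by
  induction cs with
  | nil => simp [pvExcess, pvCountGe]
  | cons c cs ih =>
    rw [pvExcess_cons, pvExcess_cons, pvCountGe_cons, ih]
    split_ifs <;> push_cast <;> omega

lemma pvCountGe_sub_one (cs : List Int) (L : Int) :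
    (pvCountGe cs (L - 1) : Int) = (pvCountGe cs L : Int) + cs.count (L - 1) := by
  induction cs with
  | nil => simp [pvCountGe]
  | cons c cs ih =>
    rw [pvCountGe_cons, pvCountGe_cons, List.count_cons]
    push_cast [ih]
    rcases eq_or_ne c (L-1) with h | h <;> split_ifs <;> simp_all <;> omega

lemma pvLevel_unique (cs : List Int) (k a b : Int)
    (ha1 : pvExcess cs a ≤ k) (ha2 : k < pvExcess cs (a - 1))
    (hb1 : pvExcess cs b ≤ k) (hb2 : k < pvExcess cs (b - 1)) : a = b := by
  rcases lt_trichotomy a b with h | h | h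
  · have := pvExcess_anti cs (show a ≤ b - 1 by omega)
    omega
  · exact h
  · have := pvExcess_anti cs (show b ≤ a - 1 by omega)
    omega

lemma pvBisect_spec (cs : List Int) (k : Int) : ∀ (lo hi : Int), lo ≤ hi →
    pvExcess cs hi ≤ k →
    lo ≤ pvBisect cs k lo hi ∧ pvBisect cs k lo hi ≤ hi ∧
      pvExcess cs (pvBisect cs k lo hi) ≤ k ∧
      (lo < pvBisect cs k lo hi → k < pvExcess cs (pvBisect cs k lo hi - 1)) := by
  intro lo hi
  induction lo, hi using pvBisect.induct cs k with
  | case1 lo hi h hmid ih =>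
    intro _ _
    have hb := PySem.Int.floordiv_two_mid_bounds (le_of_lt h)
    rw [pvBisect, dif_pos h, if_pos hmid]
    obtain ⟨i1, i2, i3, i4⟩ := ih hb.1 hmid
    exact ⟨i1, le_trans i2 hb.2, i3, i4⟩
  | case2 lo hi h hmid ih =>
    intro _ hhi
    have hb := PySem.Int.floordiv_two_mid_bounds (le_of_lt h)
    have hlt : PySem.Int.floordiv (lo + hi) 2 < hi :=
      (PySem.Int.floordiv_lt_iff_lt_mul (by norm_num)).2 (by omega)
    rw [pvBisect, dif_pos h, if_neg hmid]
    obtain ⟨i1, i2, i3, i4⟩ := ih (by omega) hhi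
    refine ⟨by omega, i2, i3, fun _ => ?_⟩
    rcases eq_or_lt_of_le i1 with heq | hlt2
    · rw [← heq]
      simp only [add_sub_cancel_right]
      omega
    · exact i4 hlt2
  | case3 lo hi h =>
    intro hle hhi
    have heq : lo = hi := by omega
    subst heq
    rw [pvBisect, dif_neg h]
    exact ⟨le_rfl, le_rfl, hhi, by omega⟩

lemma pvCount_canon (cs : List Int) (L : Int) (rem : Nat) (a : Int) :
    (pvCanon cs L rem).count a =
      (if a < L then cs.count a else 0) + (if a = L then pvCountGe cs L - rem else 0)
        + (if a = L - 1 then rem else 0) := by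
  have hf : (cs.filter (fun c => decide (c < L))).count a = if a < L then cs.count a else 0 := by
    split_ifs with h1
    · exact List.count_filter (by simpa using h1)
    · exact List.count_eq_zero.2 (fun hmem => h1 (by simpa using (List.mem_filter.1 hmem).2))
  simp only [pvCanon, List.count_append, List.count_replicate, hf, beq_iff_eq]
  split_ifs <;> omega

lemma pvMem_canon_le (cs : List Int) (L : Int) (rem : Nat) {x : Int}
    (hx : x ∈ pvCanon cs L rem) : x ≤ L := by
  simp only [pvCanon, List.mem_append, List.mem_filter, List.mem_replicate,
    decide_eq_true_eq] at hx
  rcases hx with (⟨_, h⟩ | ⟨_, h⟩) | ⟨_, h⟩ <;> omega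

lemma pvMax_canon (cs : List Int) (L : Int) (rem : Nat) {s : List Int}
    (hs : s.Perm (pvCanon cs L rem)) (hrem : rem < pvCountGe cs L) :
    PySem.List.max? s (fun x => x) = some L := by
  have hLmem : L ∈ s := by
    apply hs.mem_iff.2
    apply List.mem_append_left
    apply List.mem_append_right
    exact List.mem_replicate.2 ⟨by omega, rfl⟩
  rcases h : PySem.List.max? s (fun x => x) with _ | v
  · rw [PySem.List.max?_eq_none_iff] at h
    rw [h] at hLmem
    exact absurd hLmem (List.not_mem_nil)
  · have hv : v ≤ L := pvMem_canon_le cs L rem (hs.mem_iff.1 (PySem.List.max?_mem h))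
    have hLv : L ≤ v := PySem.List.max?_isMax h L hLmem
    rw [le_antisymm hv hLv]

lemma pvCanon_level_down (cs : List Int) (L : Int) :
    (pvCanon cs L (pvCountGe cs L)).Perm (pvCanon cs (L - 1) 0) := by
  rw [List.perm_iff_count]
  intro a
  have h2 := pvCountGe_sub_one cs L
  rw [pvCount_canon, pvCount_canon]
  rcases eq_or_ne a (L - 1) with rfl | hne
  · split_ifs <;> omega
  · split_ifs <;> omega

lemma pvChain (cs : List Int) (hnn : ∀ c ∈ cs, 0 ≤ c) : ∀ (n : Nat) (L : Int) (rem : Nat)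
    (s : List Int), 0 ≤ L → rem < pvCountGe cs L → s.Perm (pvCanon cs L rem) →
    pvExcess cs L + rem + n < cs.sum →
    ∃ (L' : Int) (rem' : Nat),
      0 ≤ L' ∧ rem' < pvCountGe cs L' ∧
      pvExcess cs L' + rem' = pvExcess cs L + rem + n ∧
      pvALoop s n = some (((pvCanon cs L' rem').map (fun i => i ^ 2)).sum) := by
  intro n
  induction n with
  | zero =>
    intro L rem s hL0 hrem hs _
    refine ⟨L, rem, hL0, hrem, by omega, ?_⟩
    simp only [pvALoop]
    congr 1
    exact (hs.map _).sum_eq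
  | succ n ih =>
    intro L rem s hL0 hrem hs hlt
    have hsum0 : pvExcess cs 0 = cs.sum := pvExcess_zero_of cs hnn
    have hL1 : 1 ≤ L := by
      rcases lt_or_ge L 1 with h | h
      · have hz : L = 0 := by omega
        rw [hz] at hlt
        omega
      · exact h
    have hmax : PySem.List.max? s (fun x => x) = some L := pvMax_canon cs L rem hs hrem
    have hLne : ¬(L = 0) := by omega
    have hLmem : L ∈ s := by
      apply hs.mem_iff.2
      apply List.mem_append_left
      apply List.mem_append_right
      exact List.mem_replicate.2 ⟨by omega, rfl⟩
    obtain ⟨idx, hidx⟩ :=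
      Option.isSome_iff_exists.1 ((PySem.List.index?_isSome_iff s L).2 hLmem)
    obtain ⟨pre, suf, hdec, hlen, hnpre⟩ := (PySem.List.index?_eq_some_iff s L idx).1 hidx
    have hget : PySem.List.pyGetD s (idx : Int) 0 = L := by
      rw [PySem.List.pyGetD_natCast]
      obtain ⟨hk, hval, _⟩ := PySem.List.getElem_of_index?_eq_some hidx
      rw [List.getD_eq_getElem s 0 hk, hval]
    have hset : PySem.List.pySetD s (idx : Int) (L - 1) = pre ++ (L - 1) :: suf := by
      rw [PySem.List.pySetD_natCast, hdec, ← hlen]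
      simp
    have hperm' : (pre ++ (L - 1) :: suf).Perm (pvCanon cs L (rem + 1)) := by
      rw [List.perm_iff_count]
      intro a
      have h0 := hs.count_eq a
      rw [pvCount_canon] at h0
      have hsa : s.count a = pre.count a + (if a = L then 1 else 0) + suf.count a := by
        rw [hdec]
        simp only [List.count_append, List.count_cons, beq_iff_eq]
        split_ifs <;> omega
      have hgoal : (pre ++ (L - 1) :: suf).count a
          = pre.count a + (if a = L - 1 then 1 else 0) + suf.count a := by
        simp only [List.count_append, List.count_cons, beq_iff_eq]
        split_ifs <;> omega
      rw [hgoal, pvCount_canon]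
      rw [hsa] at h0
      split_ifs at h0 ⊢ <;> omega
    have hunfold : pvALoop s (n + 1) = pvALoop (pre ++ (L - 1) :: suf) n := by
      simp only [pvALoop, hmax, if_neg hLne, hidx, hget, hset]
    rcases lt_or_ge (rem + 1) (pvCountGe cs L) with hcase | hcase
    · obtain ⟨L', rem', j1, j2, j3, j4⟩ :=
        ih L (rem + 1) (pre ++ (L - 1) :: suf) hL0 hcase hperm' (by push_cast at hlt ⊢; omega)
      exact ⟨L', rem', j1, j2, by push_cast at j3 ⊢; omega, by rw [hunfold]; exact j4⟩
    · have hcase' : rem + 1 = pvCountGe cs L := by omega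
      have hdown : (pre ++ (L - 1) :: suf).Perm (pvCanon cs (L - 1) 0) := by
        refine hperm'.trans ?_
        rw [hcase']
        exact pvCanon_level_down cs L
      have hsub := pvExcess_sub_one cs L
      have hcnt := pvCountGe_sub_one cs L
      have hcount_nonneg : (0 : Int) ≤ cs.count (L - 1) := by positivity
      obtain ⟨L', rem', j1, j2, j3, j4⟩ :=
        ih (L - 1) 0 (pre ++ (L - 1) :: suf) (by omega)
          (by omega) hdown (by push_cast at hlt ⊢; omega)
      exact ⟨L', rem', j1, j2, by push_cast at j3 ⊢; omega, by rw [hunfold]; exact j4⟩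

lemma pvExhaust : ∀ (n : Nat) (s : List Int), s ≠ [] → (∀ c ∈ s, 0 ≤ c) →
    s.sum ≤ n → pvALoop s n = some 0 := by
  intro n
  induction n with
  | zero =>
    intro s _ hnn hsum
    have hz : ∀ c ∈ s, c = 0 := fun c hc =>
      le_antisymm ((List.single_le_sum hnn c hc).trans (by exact_mod_cast hsum)) (hnn c hc)
    simp only [pvALoop]
    congr 1
    apply List.sum_eq_zero
    intro x hx
    obtain ⟨c, hc, rfl⟩ := List.mem_map.1 hx
    rw [hz c hc]
    ring
  | succ n ih =>
    intro s hne hnn hsum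
    obtain ⟨M, hmax⟩ : ∃ M, PySem.List.max? s (fun x => x) = some M := by
      rcases h : PySem.List.max? s (fun x => x) with _ | v
      · exact absurd ((PySem.List.max?_eq_none_iff _ _).1 h) hne
      · exact ⟨v, rfl⟩
    by_cases hM : M = 0
    · simp only [pvALoop, hmax, if_pos hM]
    · have hMmem := PySem.List.max?_mem hmax
      have hM1 : 1 ≤ M := by have := hnn M hMmem; omega
      obtain ⟨idx, hidx⟩ :=
        Option.isSome_iff_exists.1 ((PySem.List.index?_isSome_iff s M).2 hMmem)
      obtain ⟨pre, suf, hdec, hlen, hnpre⟩ := (PySem.List.index?_eq_some_iff s M idx).1 hidx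
      have hget : PySem.List.pyGetD s (idx : Int) 0 = M := by
        rw [PySem.List.pyGetD_natCast]
        obtain ⟨hk, hval, _⟩ := PySem.List.getElem_of_index?_eq_some hidx
        rw [List.getD_eq_getElem s 0 hk, hval]
      have hset : PySem.List.pySetD s (idx : Int) (M - 1) = pre ++ (M - 1) :: suf := by
        rw [PySem.List.pySetD_natCast, hdec, ← hlen]
        simp
      simp only [pvALoop, hmax, if_neg hM, hidx, hget, hset]
      apply ih
      · simp
      · intro c hc
        rcases List.mem_append.1 hc with h | h
        · exact hnn c (hdec ▸ List.mem_append_left _ h)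
        · rcases List.mem_cons.1 h with rfl | h
          · omega
          · exact hnn c (hdec ▸ List.mem_append_right _ (List.mem_cons_of_mem _ h))
      · have h1 : s.sum = pre.sum + M + suf.sum := by rw [hdec]; simp; ring
        have h2 : (pre ++ (M - 1) :: suf).sum = pre.sum + (M - 1) + suf.sum := by
          simp; ring
        rw [h2]
        push_cast at hsum ⊢
        omega

lemma pvSumsq_canon (cs : List Int) (L : Int) (rem : Nat) (hrem : rem ≤ pvCountGe cs L) :
    ((pvCanon cs L rem).map (fun i => i ^ 2)).sum =
      ((cs.filter (fun c => decide (c < L))).map (fun c => c * c)).sum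
        + ((pvCountGe cs L : Int) - rem) * L * L + (rem : Int) * (L - 1) * (L - 1) := by
  simp only [pvCanon, List.map_append, List.sum_append, List.map_replicate,
    List.sum_replicate, nsmul_eq_mul, pow_two]
  rw [Nat.cast_sub hrem]
  ring

lemma pvCountGe_eq_count (cs : List Int) (M : Int) (h : ∀ c ∈ cs, c ≤ M) :
    pvCountGe cs M = cs.count M := by
  induction cs with
  | nil => simp [pvCountGe]
  | cons c cs ih =>
    have hc := h c (List.mem_cons_self ..)
    rw [pvCountGe_cons, List.count_cons, ih (fun x hx => h x (List.mem_cons_of_mem _ hx))]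
    rcases eq_or_ne c M with rfl | hne <;> simp_all <;> omega

lemma pvPerm_canon_init (cs : List Int) {M : Int}
    (hmax : PySem.List.max? cs (fun x => x) = some M) : cs.Perm (pvCanon cs M 0) := by
  have hle : ∀ c ∈ cs, c ≤ M := PySem.List.max?_isMax hmax
  rw [List.perm_iff_count]
  intro a
  rw [pvCount_canon, pvCountGe_eq_count cs M hle]
  by_cases h1 : a < M
  · split_ifs <;> omega
  · by_cases h2 : a = M
    · subst h2; split_ifs <;> omega
    · have : cs.count a = 0 := List.count_eq_zero.2 (fun hmem => by
        have := hle a hmem; omega)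
      split_ifs <;> omega

-- ===== VERDICT (by name: the statement is the Claim_ definition above) =====
theorem minimize_string_spec : Claim_equal_minimize_string := by
  intro str1 k _ _
  unfold Spec_minimize_string minimize_string minimize_string_alt
  dsimp only
  set cs : List Int := ("abcdefghijklmnopqrstuvwxyz".toList).foldl (fun acc i =>
      if PySem.Str.isIn (String.singleton i) str1 then
        acc ++ [(PySem.Str.count str1 (String.singleton i) : Int)]
      else acc) [] with hcs
  have hform : cs = (("abcdefghijklmnopqrstuvwxyz".toList).filter
      (fun i => PySem.Str.isIn (String.singleton i) str1)).map
      (fun i => (PySem.Str.count str1 (String.singleton i) : Int)) := by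
    rw [hcs, PySem.List.foldl_append_if]
    simp
  have hnn : ∀ c ∈ cs, 0 ≤ c := by
    intro c hc
    rw [hform] at hc
    obtain ⟨i, _, rfl⟩ := List.mem_map.1 hc
    positivity
  have hsum_nonneg : 0 ≤ cs.sum := List.sum_nonneg hnn
  by_cases h1 : cs.sum ≤ k
  · rw [if_pos h1]
    have hk0 : 0 ≤ k := le_trans hsum_nonneg h1
    rcases hcse : cs with _ | ⟨c, cs'⟩
    · rcases hk : k.toNat with _ | n
      · simp [pvALoop]
      · simp [pvALoop, PySem.List.max?]
    · rw [← hcse]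
      rw [pvExhaust k.toNat cs (by rw [hcse]; simp) hnn
        (by rw [Int.toNat_of_nonneg hk0]; exact h1)]
      rfl
  · rw [if_neg h1]
    by_cases h2 : k ≤ 0
    · rw [if_pos h2]
      have hk : k.toNat = 0 := Int.toNat_of_nonpos h2
      rw [hk]
      simp only [pvALoop, Option.getD_some, pow_two]
    · rw [if_neg h2]
      have hk1 : 1 ≤ k := by omega
      have hne : cs ≠ [] := by
        intro h
        rw [h] at h1
        simp at h1
        omega
      obtain ⟨M, hmaxcs⟩ : ∃ M, PySem.List.max? cs (fun x => x) = some M := by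
        rcases h : PySem.List.max? cs (fun x => x) with _ | v
        · exact absurd ((PySem.List.max?_eq_none_iff _ _).1 h) hne
        · exact ⟨v, rfl⟩
      rw [hmaxcs]
      simp only [Option.getD_some]
      have hM0 : 0 ≤ M := hnn M (PySem.List.max?_mem hmaxcs)
      have hfM : pvExcess cs M = 0 :=
        pvExcess_eq_zero_of_le cs M (PySem.List.max?_isMax hmaxcs)
      obtain ⟨b1, b2, b3, b4⟩ := pvBisect_spec cs k 0 M hM0 (by omega)
      set L := pvBisect cs k 0 M with hLdef
      have hf0 : pvExcess cs 0 = cs.sum := pvExcess_zero_of cs hnn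
      have hL1 : 1 ≤ L := by
        rcases lt_or_ge L 1 with h | h
        · have hz : L = 0 := by omega
          rw [hz, hf0] at b3
          omega
        · exact h
      have hbrk : k < pvExcess cs (L - 1) := b4 (by omega)
      have hMcnt : 0 < pvCountGe cs M := by
        have : M ∈ cs.filter (fun c => decide (M ≤ c)) :=
          List.mem_filter.2 ⟨PySem.List.max?_mem hmaxcs, by simp⟩
        have := List.length_pos_of_mem this
        exact this
      obtain ⟨L', rem', j1, j2, j3, j4⟩ := pvChain cs hnn k.toNat M 0 cs hM0 hMcnt
        (pvPerm_canon_init cs hmaxcs)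
        (by rw [hfM, Int.toNat_of_nonneg (by omega)]; omega)
      rw [hfM, Int.toNat_of_nonneg (by omega)] at j3
      have hL'1 : 1 ≤ L' := by
        rcases lt_or_ge L' 1 with h | h
        · have hz : L' = 0 := by omega
          rw [hz, hf0] at j3
          omega
        · exact h
      have hfL' : pvExcess cs L' ≤ k := by omega
      have hsubL' := pvExcess_sub_one cs L'
      have hfL'b : k < pvExcess cs (L' - 1) := by omega
      have hLL' : L = L' := pvLevel_unique cs k L L' b3 hbrk hfL' hfL'b
      rw [j4, Option.getD_some, pvSumsq_canon cs L' rem' (le_of_lt j2), ← hLL']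
      have hrem' : (rem' : Int) = k - pvExcess cs L := by rw [hLL']; omega
      rw [hrem']
      simp only [← hLdef]
      unfold pvCountGe
      ring
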